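-- pv_equiv track=rewrite | github.com/jordiSabroson/IA | Models de llenguatge/tokenizer.py | actualitzar_diccionari
-- ===== SOURCE A (Python) =====
-- def actualitzar_diccionari(diccionari, frequents, index_inici):
--     nou_diccionari = diccionari.copy() # copiem el diccionari actual
--     nou_index = index_inici
--     for seq in frequents:
--         if seq not in nou_diccionari: # si la sequencia no es troba al diccionari l'afegim
--             nou_diccionari[seq] = nou_index
--             nou_index += 1
--     return nou_diccionari
-- ===== SOURCE B (Python) =====
-- def actualitzar_diccionari(diccionari, frequents, index_inici):
--     # Select the new sequences first (deduped, first-occurrence order), then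
--     # assign consecutive indices in one bulk update.
--     existents = set(diccionari)
--     candidats = [s for s in dict.fromkeys(frequents) if s not in existents]
--     nou = diccionari.copy()
--     nou.update((s, index_inici + i) for i, s in enumerate(candidats))
--     return nou
-- ===== Notes on version B (the rewrite author's own statement) =====
-- stated objective: simpler
-- what changed: Replaces the single loop with a running counter by a two-phase decomposition: first compute the deduped list of genuinely new sequences (dict.fromkeys + filter against the original dict), then assign consecutive indices via enumerate in one bulk update.
import Mathlib
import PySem

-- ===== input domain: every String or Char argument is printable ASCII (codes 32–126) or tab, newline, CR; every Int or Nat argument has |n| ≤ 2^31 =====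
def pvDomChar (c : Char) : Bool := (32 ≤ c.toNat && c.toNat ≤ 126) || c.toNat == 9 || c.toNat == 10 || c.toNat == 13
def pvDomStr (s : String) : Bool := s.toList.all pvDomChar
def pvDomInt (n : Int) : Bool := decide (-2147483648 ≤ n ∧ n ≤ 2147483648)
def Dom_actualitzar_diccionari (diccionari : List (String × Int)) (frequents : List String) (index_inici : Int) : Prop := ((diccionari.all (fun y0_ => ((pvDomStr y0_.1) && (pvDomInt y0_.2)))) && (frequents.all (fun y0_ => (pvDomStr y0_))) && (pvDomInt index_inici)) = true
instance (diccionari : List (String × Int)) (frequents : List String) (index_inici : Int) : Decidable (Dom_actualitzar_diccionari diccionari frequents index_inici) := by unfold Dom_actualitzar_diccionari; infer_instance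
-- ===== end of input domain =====

-- B separates "which sequences are new" (deduped candidate list) from "assign
-- consecutive indices" (bulk enumerate update), instead of one loop with a running counter.

-- ===== PORT A =====
def actualitzar_diccionari (diccionari : List (String × Int)) (frequents : List String) (index_inici : Int) : List (String × Int) :=
  ((frequents.foldl
      (fun (st : PySem.Dict String Int × Int) seq =>
        if !st.1.contains seq then (st.1.insert seq st.2, st.2 + 1) else st)
      (PySem.Dict.ofList diccionari, index_inici)).1).items

-- ===== PORT B =====
def actualitzar_diccionari_alt (diccionari : List (String × Int)) (frequents : List String) (index_inici : Int) : List (String × Int) :=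
  let existents : PySem.Set String := PySem.Set.ofList (diccionari.map Prod.fst)
  let candidats : List String :=
    (PySem.List.dedup frequents).filter (fun s => !(PySem.Set.contains existents s))
  ((PySem.List.enumerate candidats).foldl
      (fun (d : PySem.Dict String Int) p => d.insert p.2 (index_inici + p.1))
      (PySem.Dict.ofList diccionari)).items

-- ===== PRECONDITION & SPEC =====
def Spec_actualitzar_diccionari (diccionari : List (String × Int)) (frequents : List String) (index_inici : Int) (out : List (String × Int)) : Prop := out = actualitzar_diccionari_alt diccionari frequents index_inici
instance (diccionari : List (String × Int)) (frequents : List String) (index_inici : Int) (out : List (String × Int)) : Decidable (Spec_actualitzar_diccionari diccionari frequents index_inici out) := by unfold Spec_actualitzar_diccionari; infer_instance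

-- ===== CLAIM (what is proved, stated in full; the proofs are below) =====
def Claim_equal_actualitzar_diccionari : Prop := ∀ (diccionari : List (String × Int)) (frequents : List String) (index_inici : Int), Dom_actualitzar_diccionari diccionari frequents index_inici → Spec_actualitzar_diccionari diccionari frequents index_inici (actualitzar_diccionari diccionari frequents index_inici)

-- ===== LEMMAS AND PROOFS =====

-- proof helpers

def pvRunIns (d : PySem.Dict String Int) (i : Int) : List String → PySem.Dict String Int
  | [] => d
  | c :: cs => pvRunIns (d.insert c i) (i + 1) cs

theorem pv_enum_fold (cs : List String) : ∀ (d : PySem.Dict String Int) (i j : Int),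
    (PySem.List.enumerate cs j).foldl (fun d p => d.insert p.2 (i + p.1)) d = pvRunIns d (i + j) cs := by
  induction cs with
  | nil => intro d i j; simp [PySem.List.enumerate_nil, pvRunIns]
  | cons c cs ih =>
    intro d i j
    rw [PySem.List.enumerate_cons]
    simp only [List.foldl_cons]
    rw [ih]
    have : i + (j + 1) = (i + j) + 1 := by ring
    rw [this, pvRunIns]

theorem pv_filter_discard (X : List String) (p : String → Bool) (s : String) (hp : p s = false) :
    (PySem.Set.discard X s).filter p = X.filter p := by
  simp only [PySem.Set.discard, List.filter_filter]
  congr 1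
  funext y
  by_cases h : y = s <;> simp [h, hp]

theorem pv_loop_eq (f : List String) : ∀ (d : PySem.Dict String Int) (i : Int),
    (f.foldl
        (fun (st : PySem.Dict String Int × Int) seq =>
          if !st.1.contains seq then (st.1.insert seq st.2, st.2 + 1) else st)
        (d, i)).1
      = pvRunIns d i ((PySem.List.dedup f).filter (fun s => !(d.contains s))) := by
  induction f with
  | nil =>
    intro d i
    simp [PySem.List.dedup_eq_ofList, PySem.Set.ofList_nil, pvRunIns]
  | cons s f ih =>
    intro d i
    simp only [List.foldl_cons, PySem.List.dedup_eq_ofList, PySem.Set.ofList_cons,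
      List.filter_cons] at *
    by_cases hc : d.contains s = true
    · rw [if_neg (by simp [hc]), if_neg (by simp [hc])]
      rw [ih d i]
      rw [pv_filter_discard _ _ _ (by simp [hc])]
    · have hc' : d.contains s = false := by simpa using hc
      rw [if_pos (by simp [hc']), if_pos (by simp [hc'])]
      rw [ih (d.insert s i) (i + 1)]
      rw [pvRunIns]
      congr 1
      simp only [PySem.Set.discard, List.filter_filter]
      congr 1
      funext y
      by_cases h : y = s <;> simp [h, PySem.Dict.contains_insert, Bool.and_comm]

theorem pv_keys_ofList (l : List (String × Int)) :
    (PySem.Dict.ofList l).keys = PySem.Set.ofList (l.map Prod.fst) := by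
  have h := PySem.Dict.keys_foldl_insert_key (l := l) (key := Prod.fst)
    (f := fun (d : PySem.Dict String Int) (x : String × Int) => x.2) (d := PySem.Dict.empty)
  simpa [PySem.Dict.ofList, PySem.Dict.update, PySem.Dict.keys_empty,
    PySem.Set.update_nil_left] using h

theorem pv_contains_ofList (l : List (String × Int)) (k : String) :
    (PySem.Dict.ofList l).contains k
      = PySem.Set.contains (PySem.Set.ofList (l.map Prod.fst)) k := by
  rw [Bool.eq_iff_iff, PySem.Dict.contains_iff_mem_keys, PySem.Set.contains_iff, pv_keys_ofList]


-- ===== VERDICT (by name: the statement is the Claim_ definition above) =====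
theorem actualitzar_diccionari_spec : Claim_equal_actualitzar_diccionari := by
  intro diccionari frequents index_inici _
  unfold Spec_actualitzar_diccionari actualitzar_diccionari actualitzar_diccionari_alt
  rw [pv_loop_eq]
  simp only [pv_enum_fold, add_zero]
  congr 2
  · congr 1
    funext s
    rw [pv_contains_ofList]
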